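-- pv_equiv track=rewrite | github.com/Jeann1809/Python-practice-questions | sets_unit_2_2.py | navigate_research_station
-- ===== SOURCE A (Python) =====
-- def navigate_research_station(station_layout, observations):
--     index = {ch: i for i, ch in enumerate(station_layout)}
--     pos = 0
--     time = 0
--     for ch in observations:
--         time += abs(index[ch] - pos)
--         pos = index[ch]
--     return time
-- ===== SOURCE B (Python) =====
-- def navigate_research_station(station_layout, observations):
--     index = {ch: i for i, ch in enumerate(station_layout)}
--     # sweep over corridor boundaries: diff[k] counts legs opening minus legs closing at k
--     diff = [0] * (len(station_layout) + 1)
--     prev = 0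
--     for ch in observations:
--         cur = index[ch]
--         lo = min(prev, cur)
--         hi = max(prev, cur)
--         diff[lo] += 1
--         diff[hi] -= 1
--         prev = cur
--     total = 0
--     running = 0
--     for k in range(len(station_layout)):
--         running += diff[k]
--         total += running
--     return total
-- ===== Notes on version B (the rewrite author's own statement) =====
-- stated objective: alternative
-- what changed: Replaces A's running sum of |index[ch]-pos| with a boundary-crossing sweep: each leg marks +1/-1 in a difference array over corridor boundaries, then one prefix-sum pass totals the crossings; correct because |hi-lo| equals the number of boundaries k with lo<=k<hi.
import Mathlib
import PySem

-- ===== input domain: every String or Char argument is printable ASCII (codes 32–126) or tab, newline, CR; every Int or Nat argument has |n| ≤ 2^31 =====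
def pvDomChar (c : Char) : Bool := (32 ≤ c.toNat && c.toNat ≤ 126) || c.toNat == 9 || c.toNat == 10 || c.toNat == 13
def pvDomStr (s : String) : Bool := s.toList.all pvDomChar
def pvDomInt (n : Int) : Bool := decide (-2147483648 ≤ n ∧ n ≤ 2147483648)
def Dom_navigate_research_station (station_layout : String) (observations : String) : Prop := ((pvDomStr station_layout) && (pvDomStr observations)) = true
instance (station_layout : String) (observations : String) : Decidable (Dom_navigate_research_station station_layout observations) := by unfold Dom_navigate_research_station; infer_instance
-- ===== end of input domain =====

-- B replaces A's running |index[ch]-pos| sum by a boundary-crossing sweep: each leg marks +1/-1 in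
-- a difference array over corridor boundaries, then one prefix-sum pass totals the crossings.

-- ===== PORT A =====
def navigate_research_station (station_layout : String) (observations : String) : Int :=
  -- index = {ch: i for i, ch in enumerate(station_layout)}
  let index : PySem.Dict Char Int :=
    (PySem.List.enumerate station_layout.toList).foldl
      (fun d p => d.insert p.2 p.1) PySem.Dict.empty
  -- pos = 0; time = 0; for ch in observations: time += abs(index[ch] - pos); pos = index[ch]
  -- index[ch] is total under Pre_ (key present); ported as getD with dummy default 0
  let st := observations.toList.foldl
    (fun (st : Int × Int) ch =>
      let v := index.getD ch 0
      (v, st.2 + |v - st.1|)) (0, 0)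
  st.2

-- ===== PORT B =====
def navigate_research_station_alt (station_layout : String) (observations : String) : Int :=
  let index : PySem.Dict Char Int :=
    (PySem.List.enumerate station_layout.toList).foldl
      (fun d p => d.insert p.2 p.1) PySem.Dict.empty
  -- diff = [0] * (len(station_layout) + 1)
  let diff0 : List Int := PySem.List.pyRepeat [0] (PySem.Str.len station_layout + 1)
  -- prev = 0; for ch: cur = index[ch]; lo = min(prev,cur); hi = max(prev,cur);
  --   diff[lo] += 1; diff[hi] -= 1; prev = cur
  -- (diff[x] indexing is total under Pre_: 0 ≤ x ≤ len(layout); ported via pyGetD/pySetD)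
  let st := observations.toList.foldl
    (fun (st : List Int × Int) ch =>
      let cur := index.getD ch 0
      let lo := min st.2 cur
      let hi := max st.2 cur
      let d1 := PySem.List.pySetD st.1 lo (PySem.List.pyGetD st.1 lo 0 + 1)
      let d2 := PySem.List.pySetD d1 hi (PySem.List.pyGetD d1 hi 0 - 1)
      (d2, cur)) (diff0, 0)
  -- total = 0; running = 0; for k in range(len(station_layout)): running += diff[k]; total += running
  ((PySem.List.pyRange 0 (PySem.Str.len station_layout) 1).foldl
    (fun (acc : Int × Int) k =>
      let running := acc.2 + PySem.List.pyGetD st.1 k 0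
      (acc.1 + running, running)) (0, 0)).1

-- ===== PRECONDITION & SPEC =====
-- Pre_ excludes exactly the inputs where the Python A raises KeyError: an observation
-- character that does not occur in station_layout (B raises there too).
def Pre_navigate_research_station (station_layout : String) (observations : String) : Prop :=
  observations.toList.all (fun c => station_layout.toList.contains c) = true
instance (station_layout : String) (observations : String) : Decidable (Pre_navigate_research_station station_layout observations) := by unfold Pre_navigate_research_station; infer_instance
def pvWitness_navigate_research_station : String × String := ("abc", "cab")

def Spec_navigate_research_station (station_layout : String) (observations : String) (out : Int) : Prop := out = navigate_research_station_alt station_layout observations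
instance (station_layout : String) (observations : String) (out : Int) : Decidable (Spec_navigate_research_station station_layout observations out) := by unfold Spec_navigate_research_station; infer_instance

-- ===== CLAIM (what is proved, stated in full; the proofs are below) =====
def Claim_equal_navigate_research_station : Prop := ∀ (station_layout : String) (observations : String), Dom_navigate_research_station station_layout observations → Pre_navigate_research_station station_layout observations → Spec_navigate_research_station station_layout observations (navigate_research_station station_layout observations)

-- ===== LEMMAS AND PROOFS =====

-- The list of legs ((min,max) intervals) visited from position p through cs under position map g.
def pvLegs (g : Char → Int) : Int → List Char → List (Int × Int)
  | _, [] => []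
  | p, c :: cs => (min p (g c), max p (g c)) :: pvLegs g (g c) cs

-- A's fold equals the sum of the leg lengths.
theorem pv_A_loop (g : Char → Int) (cs : List Char) (p t : Int) :
    (cs.foldl (fun (st : Int × Int) ch => (g ch, st.2 + |g ch - st.1|)) (p, t)).2
      = t + ((pvLegs g p cs).map (fun q => q.2 - q.1)).sum := by
  induction cs generalizing p t with
  | nil => simp [pvLegs]
  | cons c cs ih =>
      simp only [List.foldl_cons, pvLegs, List.map_cons, List.sum_cons]
      rw [ih]
      rcases le_total p (g c) with h | h
      · rw [abs_of_nonneg (by omega), min_eq_left h, max_eq_right h]; ring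
      · rw [abs_of_nonpos (by omega), min_eq_right h, max_eq_left h]; ring

-- countP of a cons, with the count cast to Int.
theorem pv_countP_cons_int {α : Type} (l : List α) (p : α → Bool) (q : α) :
    (((q :: l).countP p : Nat) : Int) = (if p q then 1 else 0) + (l.countP p : Int) := by
  rw [List.countP_cons]
  split_ifs <;> simp <;> omega

-- Reading an updated cell: Python's diff[j] after diff[i] = v, both indices in range.
theorem pv_getD_setD (xs : List Int) (i j v : Int) (hi0 : 0 ≤ i) (hil : i < (xs.length : Int))
    (hj0 : 0 ≤ j) (hjl : j < (xs.length : Int)) :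
    PySem.List.pyGetD (PySem.List.pySetD xs i v) j 0
      = if j = i then v else PySem.List.pyGetD xs j 0 := by
  obtain ⟨m, rfl⟩ : ∃ m : Nat, i = (m : Int) := ⟨i.toNat, by omega⟩
  obtain ⟨k, rfl⟩ : ∃ k : Nat, j = (k : Int) := ⟨j.toNat, by omega⟩
  rw [PySem.List.pySetD_natCast, PySem.List.pyGetD_natCast, PySem.List.pyGetD_natCast]
  rcases eq_or_ne k m with rfl | hne
  · have : k < xs.length := by omega
    simp [List.getD_eq_getElem?_getD, this]
  · have h2 : ¬ ((k : Int) = (m : Int)) := by omega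
    have h3 : ¬ (m = k) := fun h => hne h.symm
    simp [h2, h3, List.getD_eq_getElem?_getD]

-- Arithmetic core of one diff-array update (F x stands for the cell read at x).
theorem pv_upd (F : Int → Int) (lo hi j : Int) :
    (if j = hi then (if hi = lo then F lo + 1 else F hi) - 1
     else if j = lo then F lo + 1 else F j)
      = F j + (if lo = j then 1 else 0) - (if hi = j then 1 else 0) := by
  split_ifs <;> subst_vars <;> (first | ring1 | (exfalso; omega))

-- After B's first loop, diff[j] counts legs opening at j minus legs closing at j.
theorem pv_diff_char (g : Char → Int) (L : Int) (cs : List Char) :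
    ∀ (diff : List Int) (p j : Int),
      (diff.length : Int) = L + 1 → 0 ≤ p → p ≤ L →
      (∀ c ∈ cs, 0 ≤ g c ∧ g c ≤ L) → 0 ≤ j → j ≤ L →
      PySem.List.pyGetD
        ((cs.foldl (fun (st : List Int × Int) ch =>
            (PySem.List.pySetD
               (PySem.List.pySetD st.1 (min st.2 (g ch))
                 (PySem.List.pyGetD st.1 (min st.2 (g ch)) 0 + 1))
               (max st.2 (g ch))
               (PySem.List.pyGetD
                 (PySem.List.pySetD st.1 (min st.2 (g ch))
                   (PySem.List.pyGetD st.1 (min st.2 (g ch)) 0 + 1))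
                 (max st.2 (g ch)) 0 - 1),
             g ch)) (diff, p)).1) j 0
        = PySem.List.pyGetD diff j 0
          + ((pvLegs g p cs).countP (fun q => q.1 == j) : Int)
          - ((pvLegs g p cs).countP (fun q => q.2 == j) : Int) := by
  induction cs with
  | nil => intro diff p j _ _ _ _ _ _; simp [pvLegs]
  | cons c cs ih =>
    intro diff p j hlen hp0 hpL hg hj0 hjL
    have hc := hg c List.mem_cons_self
    set lo := min p (g c) with hlo
    set hi := max p (g c) with hhi
    have hlo0 : 0 ≤ lo := le_min hp0 hc.1
    have hloL : lo ≤ L := le_trans (min_le_left _ _) hpL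
    have hhi0 : 0 ≤ hi := le_trans hp0 (le_max_left _ _)
    have hhiL : hi ≤ L := max_le hpL hc.2
    set d1 := PySem.List.pySetD diff lo (PySem.List.pyGetD diff lo 0 + 1) with hd1
    have hlen1 : (d1.length : Int) = L + 1 := by
      rw [hd1, PySem.List.length_pySetD]; exact hlen
    set d2 := PySem.List.pySetD d1 hi (PySem.List.pyGetD d1 hi 0 - 1) with hd2
    have hlen2 : (d2.length : Int) = L + 1 := by
      rw [hd2, PySem.List.length_pySetD]; exact hlen1
    simp only [List.foldl_cons]
    rw [ih d2 (g c) j hlen2 hc.1 hc.2 (fun c' h' => hg c' (List.mem_cons_of_mem _ h')) hj0 hjL]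
    have e1 : ∀ x, 0 ≤ x → x ≤ L →
        PySem.List.pyGetD d1 x 0
          = if x = lo then PySem.List.pyGetD diff lo 0 + 1 else PySem.List.pyGetD diff x 0 := by
      intro x hx0 hxL
      rw [hd1, pv_getD_setD diff lo x _ hlo0 (by omega) hx0 (by omega)]
    have e2 : PySem.List.pyGetD d2 j 0
        = if j = hi then PySem.List.pyGetD d1 hi 0 - 1 else PySem.List.pyGetD d1 j 0 := by
      rw [hd2, pv_getD_setD d1 hi j _ hhi0 (by omega) hj0 (by omega)]
    rw [e2, e1 hi hhi0 hhiL, e1 j hj0 hjL]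
    simp only [pvLegs, ← hlo, ← hhi]
    rw [pv_countP_cons_int, pv_countP_cons_int]
    simp only [beq_iff_eq]
    rw [pv_upd (fun x => PySem.List.pyGetD diff x 0) lo hi j]
    ring

-- T k - T(k-1) = (legs opening at k) - (legs closing at k), for legs with lo ≤ hi.
theorem pv_T_step (legs : List (Int × Int)) (k : Int) (hb : ∀ q ∈ legs, q.1 ≤ q.2) :
    ((legs.countP (fun q => decide (q.1 ≤ k ∧ k < q.2)) : Nat) : Int)
      = (legs.countP (fun q => decide (q.1 ≤ k - 1 ∧ k - 1 < q.2)) : Int)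
        + (legs.countP (fun q => q.1 == k) : Int) - (legs.countP (fun q => q.2 == k) : Int) := by
  induction legs with
  | nil => simp
  | cons q legs ih =>
    have hq := hb q List.mem_cons_self
    rw [pv_countP_cons_int, pv_countP_cons_int, pv_countP_cons_int, pv_countP_cons_int,
        ih (fun q h => hb q (List.mem_cons_of_mem _ h))]
    simp only [beq_iff_eq, decide_eq_true_eq]
    split_ifs <;> omega

-- B's second loop: a running prefix sum accumulates ∑ T k over the range, when T steps by f.
theorem pv_sweep (f T : Int → Int) (b : Int) :
    ∀ (n : Nat) (a t r : Int), b - a ≤ (n : Int) → r = T (a - 1) →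
      (∀ k, a ≤ k → k < b → T k = T (k - 1) + f k) →
      ((PySem.List.pyRange a b 1).foldl
          (fun (st : Int × Int) k => (st.1 + (st.2 + f k), st.2 + f k)) (t, r)).1
        = t + ((PySem.List.pyRange a b 1).map T).sum := by
  intro n
  induction n with
  | zero =>
    intro a t r h _ _
    rw [PySem.List.pyRange_one_eq_nil (by omega)]; simp
  | succ n ih =>
    intro a t r h hr hstep
    by_cases hab : a < b
    · rw [PySem.List.pyRange_one_cons hab]
      simp only [List.foldl_cons, List.map_cons, List.sum_cons]
      have hTa := hstep a le_rfl hab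
      have hra : r + f a = T (a + 1 - 1) := by
        have : a + 1 - 1 = a := by ring
        rw [this]; omega
      rw [ih (a + 1) (t + (r + f a)) (r + f a) (by omega) hra
        (fun k hk1 hk2 => hstep k (by omega) hk2)]
      omega
    · rw [PySem.List.pyRange_one_eq_nil (by omega)]; simp

-- Counting boundaries in [lo, hi) inside range [0, L): each leg with 0 ≤ lo ≤ hi ≤ L contributes hi - lo.
theorem pv_count_boundaries (lo hi L : Int) (h0 : 0 ≤ lo) (h1 : lo ≤ hi) (h2 : hi ≤ L) :
    ((PySem.List.pyRange 0 L 1).map (fun k => if lo ≤ k ∧ k < hi then (1 : Int) else 0)).sum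
      = hi - lo := by
  rw [PySem.List.pyRange_one_append 0 lo L h0 (by omega),
      PySem.List.pyRange_one_append lo hi L h1 h2]
  simp only [List.map_append, List.sum_append]
  have e1 : ((PySem.List.pyRange 0 lo 1).map (fun k => if lo ≤ k ∧ k < hi then (1 : Int) else 0))
      = (PySem.List.pyRange 0 lo 1).map (fun _ => (0 : Int)) := by
    apply List.map_congr_left
    intro x hx
    rw [PySem.List.mem_pyRange_one] at hx
    simp [show ¬ (lo ≤ x ∧ x < hi) by omega]
  have e2 : ((PySem.List.pyRange lo hi 1).map (fun k => if lo ≤ k ∧ k < hi then (1 : Int) else 0))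
      = (PySem.List.pyRange lo hi 1).map (fun _ => (1 : Int)) := by
    apply List.map_congr_left
    intro x hx
    rw [PySem.List.mem_pyRange_one] at hx
    simp [show lo ≤ x ∧ x < hi by omega]
  have e3 : ((PySem.List.pyRange hi L 1).map (fun k => if lo ≤ k ∧ k < hi then (1 : Int) else 0))
      = (PySem.List.pyRange hi L 1).map (fun _ => (0 : Int)) := by
    apply List.map_congr_left
    intro x hx
    rw [PySem.List.mem_pyRange_one] at hx
    simp [show ¬ (lo ≤ x ∧ x < hi) by omega]
  rw [e1, e2, e3]
  simp [PySem.List.length_pyRange_one]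
  omega

-- Exchange the two summations: per-boundary over legs = per-leg over boundaries.
theorem pv_swap (legs : List (Int × Int)) (L : Int) :
    ((PySem.List.pyRange 0 L 1).map
        (fun k => (legs.map (fun p => if p.1 ≤ k ∧ k < p.2 then (1 : Int) else 0)).sum)).sum
      = (legs.map (fun p =>
          ((PySem.List.pyRange 0 L 1).map (fun k => if p.1 ≤ k ∧ k < p.2 then (1 : Int) else 0)).sum)).sum := by
  induction legs with
  | nil => simp
  | cons q legs ih =>
      simp only [List.map_cons, List.sum_cons, ← ih]
      rw [← PySem.List.sum_map_add_int]

-- Every value the index dict returns on a contained key lies in [0, L).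
theorem pv_dict_values_bound (l : List (Int × Char)) (d : PySem.Dict Char Int) (P : Int → Prop)
    (hl : ∀ p ∈ l, P p.1) (hd : ∀ c, d.contains c = true → P (d.getD c 0)) :
    ∀ c, (l.foldl (fun d p => d.insert p.2 p.1) d).contains c = true →
      P ((l.foldl (fun d p => d.insert p.2 p.1) d).getD c 0) := by
  induction l generalizing d with
  | nil => exact hd
  | cons q l ih =>
      intro c hc
      refine ih _ (fun p hp => hl p (List.mem_cons_of_mem _ hp)) ?_ c hc
      intro c' hc'
      rw [PySem.Dict.getD_insert]
      split_ifs with h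
      · exact hl q (List.mem_cons_self)
      · rw [PySem.Dict.contains_insert] at hc'
        simp [h] at hc'
        exact hd c' hc'

theorem pv_index_bound (sl : String) (c : Char) (hc : c ∈ sl.toList) :
    0 ≤ ((PySem.List.enumerate sl.toList).foldl (fun d p => d.insert p.2 p.1) PySem.Dict.empty).getD c 0
    ∧ ((PySem.List.enumerate sl.toList).foldl (fun d p => d.insert p.2 p.1) PySem.Dict.empty).getD c 0
        < (sl.toList.length : Int) := by
  have hcont : ((PySem.List.enumerate sl.toList).foldl (fun d p => d.insert p.2 p.1) PySem.Dict.empty).contains c = true := by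
    rw [PySem.Dict.contains_iff_mem_keys, PySem.Dict.keys_foldl_insert_key]
    have : c ∈ (PySem.List.enumerate sl.toList).map (·.2) := by
      rw [PySem.List.map_snd_enumerate]; exact hc
    simpa [PySem.Dict.keys_empty, PySem.Set.update_nil_left] using
      (PySem.Set.mem_ofList _ _).2 this
  refine pv_dict_values_bound _ _ (fun v => 0 ≤ v ∧ v < (sl.toList.length : Int)) ?_ ?_ c hcont
  · intro p hp
    rcases (PySem.List.mem_enumerate_iff _ _ _).1 hp with ⟨k, hk, rfl⟩
    have hlen : sl.toList.length = sl.length := String.length_toList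
    constructor
    · simp
    · simp
      omega
  · intro c' hc'
    simp [PySem.Dict.contains_empty] at hc'

-- All legs from start 0 through in-range positions have 0 ≤ lo ≤ hi ≤ L.
theorem pv_legs_bound (g : Char → Int) (cs : List Char) (p L : Int)
    (hp : 0 ≤ p ∧ p ≤ L) (hg : ∀ c ∈ cs, 0 ≤ g c ∧ g c ≤ L) :
    ∀ q ∈ pvLegs g p cs, 0 ≤ q.1 ∧ q.1 ≤ q.2 ∧ q.2 ≤ L := by
  induction cs generalizing p with
  | nil => simp [pvLegs]
  | cons c cs ih =>
      intro q hq
      simp only [pvLegs, List.mem_cons] at hq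
      rcases hq with rfl | hq
      · have := hg c (List.mem_cons_self)
        refine ⟨le_min hp.1 this.1, min_le_max, max_le hp.2 this.2⟩
      · exact ih (g c) ⟨(hg c List.mem_cons_self).1, (hg c List.mem_cons_self).2⟩
          (fun c' hc' => hg c' (List.mem_cons_of_mem _ hc')) q hq

-- ===== VERDICT (by name: the statement is the Claim_ definition above) =====
theorem navigate_research_station_spec : Claim_equal_navigate_research_station := by
  intro sl obs _ hpre
  simp only [Spec_navigate_research_station, navigate_research_station, navigate_research_station_alt]
  set index := (PySem.List.enumerate sl.toList).foldl (fun d p => d.insert p.2 p.1) PySem.Dict.empty with hidx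
  set g : Char → Int := fun ch => index.getD ch 0 with hg
  set Lint := PySem.Str.len sl with hLdef
  have hLL : Lint = (sl.toList.length : Int) := by
    rw [hLdef]; simp [PySem.Str.len_eq, String.length_toList]
  have hL0 : 0 ≤ Lint := by rw [hLL]; positivity
  have hrange : ∀ c ∈ obs.toList, 0 ≤ g c ∧ g c ≤ Lint := by
    intro c hc
    have hmem : c ∈ sl.toList := by
      rw [Pre_navigate_research_station] at hpre
      have := List.all_eq_true.1 hpre c hc
      simpa [List.contains_iff_mem] using this
    have := pv_index_bound sl c hmem
    exact ⟨this.1, by rw [hLL]; exact le_of_lt this.2⟩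
  set legs := pvLegs g 0 obs.toList with hlegs
  have hlegsb : ∀ q ∈ legs, 0 ≤ q.1 ∧ q.1 ≤ q.2 ∧ q.2 ≤ Lint :=
    pv_legs_bound g obs.toList 0 Lint ⟨le_refl 0, hL0⟩ hrange
  -- A's side
  have hA := pv_A_loop g obs.toList 0 0
  simp only [zero_add] at hA
  rw [hA]
  -- B's diff array
  set diff0 : List Int := PySem.List.pyRepeat [0] (Lint + 1) with hdiff0
  have hdrep : diff0 = List.replicate (Lint + 1).toNat 0 := by
    rw [hdiff0]; simpa using PySem.List.pyRepeat_singleton (0 : Int) (Lint + 1)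
  have hdlen : (diff0.length : Int) = Lint + 1 := by rw [hdrep]; simp; omega
  have hdget : ∀ j : Int, 0 ≤ j → j ≤ Lint → PySem.List.pyGetD diff0 j 0 = 0 := by
    intro j hj0 hjL
    obtain ⟨m, rfl⟩ : ∃ m : Nat, j = (m : Int) := ⟨j.toNat, by omega⟩
    rw [hdrep, PySem.List.pyGetD_natCast]
    simp
  -- T k = number of legs crossing boundary k
  set T : Int → Int := fun k => ((legs.countP (fun q => decide (q.1 ≤ k ∧ k < q.2)) : Nat) : Int) with hT
  have hTneg : (0 : Int) = T (0 - 1) := by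
    rw [hT]
    simp only []
    rw [show ((0 : Int) - 1) = (-1 : Int) by ring]
    symm
    norm_cast
    rw [List.countP_eq_zero]
    intro q hq
    have h := hlegsb q hq
    simp only [decide_eq_true_eq]
    omega
  have hdiffchar := pv_diff_char g Lint obs.toList diff0 0
  have hstep : ∀ k, (0 : Int) ≤ k → k < Lint →
      T k = T (k - 1) + PySem.List.pyGetD
        ((obs.toList.foldl (fun (st : List Int × Int) ch =>
            (PySem.List.pySetD
               (PySem.List.pySetD st.1 (min st.2 (g ch))
                 (PySem.List.pyGetD st.1 (min st.2 (g ch)) 0 + 1))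
               (max st.2 (g ch))
               (PySem.List.pyGetD
                 (PySem.List.pySetD st.1 (min st.2 (g ch))
                   (PySem.List.pyGetD st.1 (min st.2 (g ch)) 0 + 1))
                 (max st.2 (g ch)) 0 - 1),
             g ch)) (diff0, 0)).1) k 0 := by
    intro k hk0 hkL
    rw [hdiffchar k hdlen (le_refl 0) hL0 hrange hk0 (by omega), hdget k hk0 (by omega)]
    rw [hT]
    simp only []
    rw [← hlegs]
    have := pv_T_step legs k (fun q hq => (hlegsb q hq).2.1)
    omega
  rw [pv_sweep _ T Lint Lint.toNat 0 0 0 (by omega) hTneg hstep, zero_add]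
  -- ∑ T over the range = ∑ leg lengths
  have hTsum : ((PySem.List.pyRange 0 Lint 1).map T)
      = (PySem.List.pyRange 0 Lint 1).map
          (fun k => (legs.map (fun p => if p.1 ≤ k ∧ k < p.2 then (1 : Int) else 0)).sum) := by
    apply List.map_congr_left
    intro k _
    rw [hT]
    simp only []
    have hfun : (fun (p : Int × Int) => if p.1 ≤ k ∧ k < p.2 then (1 : Int) else 0)
        = (fun p => if (fun (q : Int × Int) => decide (q.1 ≤ k ∧ k < q.2)) p = true then (1 : Int) else 0) := by
      funext p
      by_cases h : p.1 ≤ k ∧ k < p.2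
      · simp [h]
      · simp [h]
    rw [hfun, PySem.List.sum_map_ite_one_zero]
  rw [hTsum, pv_swap]
  apply congrArg List.sum
  apply List.map_congr_left
  intro q hq
  have hb := hlegsb q hq
  rw [pv_count_boundaries q.1 q.2 Lint hb.1 hb.2.1 hb.2.2]
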